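-- pv_equiv track=rewrite | github.com/pawlowiczf/WDI-2023 | WDI zestaw 4/10 przynajmniej jedno 0.py | zero_check
-- ===== SOURCE A (Python) =====
-- def zero_check(tab):
--     n = len(tab)
--     column = [ 0 for i in range(n) ]
--
--     for y in range(n):
--         flag = False
--         for x in range(n):
--             if tab[y][x] == 0:
--                 flag = True
--                 column[x] = 1
--             #end if
--         #end for 2
--         if not flag: return False
--         else: flag = True
--     #end for 1
--
--     for element in column:
--         if element == 0: return False
--     #end for
--     return True
-- ===== SOURCE B (Python) =====
-- def zero_check(tab):
--     n = len(tab)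
--     for y in range(n):
--         if not any(tab[y][x] == 0 for x in range(n)):
--             return False
--     for x in range(n):
--         if not any(tab[y][x] == 0 for y in range(n)):
--             return False
--     return True
-- ===== Notes on version B (the rewrite author's own statement) =====
-- stated objective: simpler
-- what changed: Drops A's incrementally built 0/1 column table and its final table scan; B makes two independent short-circuiting passes, one over rows and one over columns, each asking directly whether the line contains a zero.
import Mathlib
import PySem

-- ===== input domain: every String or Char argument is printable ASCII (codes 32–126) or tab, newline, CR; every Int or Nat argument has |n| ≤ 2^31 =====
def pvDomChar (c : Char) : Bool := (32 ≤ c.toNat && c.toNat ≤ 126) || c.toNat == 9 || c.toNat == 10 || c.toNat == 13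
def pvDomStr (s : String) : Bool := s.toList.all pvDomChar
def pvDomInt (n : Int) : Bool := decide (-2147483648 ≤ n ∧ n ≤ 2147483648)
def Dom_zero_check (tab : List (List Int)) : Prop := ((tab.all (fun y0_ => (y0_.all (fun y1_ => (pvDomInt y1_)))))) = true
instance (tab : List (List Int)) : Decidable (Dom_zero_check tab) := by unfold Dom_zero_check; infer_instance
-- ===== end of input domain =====

-- B replaces A's incrementally built 0/1 column table by two independent row/column scans (simpler decomposition; same O(n^2) cost).
-- B replaces A's incrementally built 0/1 column table by two independent row/column scans (simpler decomposition; same O(n^2) cost).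


-- ===== PORT A =====
-- inner loop "for x in range(n)": carries (flag, column); tab[y][x] / column[x]=1 via pyGetD / pySetD (exact under Pre_)
def zcInnerA (row : List Int) (xs : List Int) (flag : Bool) (col : List Int) : Bool × List Int :=
  match xs with
  | [] => (flag, col)
  | x :: rest =>
    if PySem.List.pyGetD row x 0 == 0 then
      zcInnerA row rest true (PySem.List.pySetD col x 1)
    else
      zcInnerA row rest flag col

-- outer loop "for y in range(n)": none = early `return False`
def zcRowsA (tab : List (List Int)) (n : Int) (ys : List Int) (col : List Int) : Option (List Int) :=
  match ys with
  | [] => some col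
  | y :: rest =>
    let r := zcInnerA (PySem.List.pyGetD tab y []) (PySem.List.pyRange 0 n 1) false col
    if r.1 then zcRowsA tab n rest r.2 else none

def zero_check (tab : List (List Int)) : Bool :=
  let n : Int := (tab.length : Int)
  let column : List Int := (PySem.List.pyRange 0 n 1).map (fun _ => 0)
  match zcRowsA tab n (PySem.List.pyRange 0 n 1) column with
  | none => false
  | some col => col.all (fun element => !(element == 0))

-- ===== PORT B =====
-- two independent passes: every row has a zero, then every column has a zero (short-circuit = all/any)
def zero_check_alt (tab : List (List Int)) : Bool :=
  let n : Int := (tab.length : Int)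
  if (PySem.List.pyRange 0 n 1).all (fun y =>
       (PySem.List.pyRange 0 n 1).any (fun x =>
         PySem.List.pyGetD (PySem.List.pyGetD tab y []) x 0 == 0)) then
    (PySem.List.pyRange 0 n 1).all (fun x =>
      (PySem.List.pyRange 0 n 1).any (fun y =>
        PySem.List.pyGetD (PySem.List.pyGetD tab y []) x 0 == 0))
  else false

-- ===== PRECONDITION & SPEC =====
-- Pre_ excludes exactly the inputs where A raises IndexError: the scan hits a row shorter than
-- len(tab) before an early `return False` — i.e. some row of length < len(tab) is preceded only by
-- full-length rows that each contain a zero among their first len(tab) entries.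
def Pre_zero_check (tab : List (List Int)) : Prop :=
  ∀ y < tab.length,
    (∀ y' < y, tab.length ≤ (tab[y']!).length ∧ (0 : Int) ∈ (tab[y']!).take tab.length) →
      tab.length ≤ (tab[y]!).length
instance (tab : List (List Int)) : Decidable (Pre_zero_check tab) := by unfold Pre_zero_check; infer_instance
def pvWitness_zero_check : List (List Int) := [[0, 1], [1, 0]]

def Spec_zero_check (tab : List (List Int)) (out : Bool) : Prop := out = zero_check_alt tab
instance (tab : List (List Int)) (out : Bool) : Decidable (Spec_zero_check tab out) := by unfold Spec_zero_check; infer_instance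

-- ===== CLAIM (what is proved, stated in full; the proofs are below) =====
def Claim_equal_zero_check : Prop := ∀ (tab : List (List Int)), Dom_zero_check tab → Pre_zero_check tab → Spec_zero_check tab (zero_check tab)

-- ===== LEMMAS AND PROOFS =====

theorem zcInnerA_eq (row : List Int) (xs : List Int) (flag : Bool) (col : List Int) :
    zcInnerA row xs flag col =
      (flag || xs.any (fun x => PySem.List.pyGetD row x 0 == 0),
       xs.foldl (fun c x => if PySem.List.pyGetD row x 0 == 0 then PySem.List.pySetD c x 1 else c) col) := by
  induction xs generalizing flag col with
  | nil => simp [zcInnerA]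
  | cons x rest ih =>
    simp only [zcInnerA, List.any_cons, List.foldl_cons]
    by_cases h : (PySem.List.pyGetD row x 0 == 0) = true
    · simp [h, ih]
    · simp only [Bool.not_eq_true] at h
      simp [h, ih]


theorem foldlSet_length (q : Int → Bool) (xs : List Int) (col : List Int) :
    (xs.foldl (fun c x => if q x then PySem.List.pySetD c x 1 else c) col).length = col.length := by
  induction xs generalizing col with
  | nil => rfl
  | cons x rest ih =>
    simp only [List.foldl_cons]
    rw [ih]
    split
    · simp [PySem.List.length_pySetD]
    · rfl


theorem foldlSet_getElem? (q : Int → Bool) (xs : List Int) (hxs : ∀ x ∈ xs, 0 ≤ x)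
    (col : List Int) (i : Nat) :
    (xs.foldl (fun c x => if q x then PySem.List.pySetD c x 1 else c) col)[i]? =
      if (xs.any (fun x => q x && x == (i : Int))) = true ∧ i < col.length then some 1
      else col[i]? := by
  induction xs generalizing col with
  | nil => simp
  | cons x rest ih =>
    have hx : 0 ≤ x := hxs x (by simp)
    simp only [List.foldl_cons]
    rw [ih (fun z hz => hxs z (by simp [hz]))]
    by_cases hq : q x = true
    · simp only [hq, if_true]
      rw [PySem.List.pySetD_of_nonneg col 1 hx]
      by_cases hrest : (rest.any (fun z => q z && z == (i : Int))) = true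
      · simp only [hrest, List.any_cons, Bool.or_true, true_and, List.length_set,
          List.getElem?_set]
        by_cases hlen : i < col.length
        · simp [hlen]
        · simp only [hlen, if_false]
          by_cases hxi : x.toNat = i
          · rw [if_pos hxi, if_neg (by omega), List.getElem?_eq_none (by omega)]
          · rw [if_neg hxi]
      · by_cases hxi : x = (i : Int)
        · have hti : x.toNat = i := by omega
          have hqi : q (i : Int) = true := hxi ▸ hq
          simp only [hrest, List.length_set, List.getElem?_set, List.any_cons, hxi]
          by_cases hlen : i < col.length
          · simp [hlen, hqi]
          · simp [hlen, hqi]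
        · have hne : x.toNat ≠ i := by omega
          have hxi' : (x == (i : Int)) = false := by simp [hxi]
          simp [hrest, hxi', List.length_set, hne]
    · simp only [Bool.not_eq_true] at hq
      simp [hq]


theorem zcRowsA_eq (tab : List (List Int)) (n : Int) (ys : List Int) (col : List Int) :
    zcRowsA tab n ys col =
      if ys.all (fun y => (PySem.List.pyRange 0 n 1).any
            (fun x => PySem.List.pyGetD (PySem.List.pyGetD tab y []) x 0 == 0)) then
        some (ys.foldl (fun c y => (PySem.List.pyRange 0 n 1).foldl
          (fun c' x => if PySem.List.pyGetD (PySem.List.pyGetD tab y []) x 0 == 0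
                       then PySem.List.pySetD c' x 1 else c') c) col)
      else none := by
  induction ys generalizing col with
  | nil => simp [zcRowsA]
  | cons y rest ih =>
    simp only [zcRowsA, zcInnerA_eq, Bool.false_or, List.all_cons, List.foldl_cons]
    rw [ih]
    by_cases h : ((PySem.List.pyRange 0 n 1).any
        (fun x => PySem.List.pyGetD (PySem.List.pyGetD tab y []) x 0 == 0)) = true
    · simp only [h, if_true, Bool.true_and]
    · simp only [Bool.not_eq_true] at h
      simp only [h, Bool.false_and, Bool.false_eq_true, if_false]


theorem foldlRows_getElem? (p : Int → Int → Bool) (ys : List Int) (xs : List Int)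
    (hxs : ∀ x ∈ xs, 0 ≤ x) (col : List Int) (i : Nat) :
    (ys.foldl (fun c y => xs.foldl
        (fun c' x => if p y x then PySem.List.pySetD c' x 1 else c') c) col)[i]? =
      if (ys.any (fun y => xs.any (fun x => p y x && x == (i : Int)))) = true ∧ i < col.length
      then some 1 else col[i]? := by
  induction ys generalizing col with
  | nil => simp
  | cons y rest ih =>
    simp only [List.foldl_cons, List.any_cons]
    rw [ih]
    rw [foldlSet_getElem? (p y) xs hxs col i, foldlSet_length]
    by_cases hrest : (rest.any (fun y => xs.any (fun x => p y x && x == (i : Int)))) = true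
    · by_cases hlen : i < col.length
      · simp [hrest, hlen]
      · simp [hrest, hlen]
    · simp [hrest]


theorem any_range_eq (n : Int) (q : Int → Bool) (i : Nat) (hi : (i : Int) < n) :
    ((PySem.List.pyRange 0 n 1).any (fun x => q x && x == (i : Int))) = q (i : Int) := by
  rw [Bool.eq_iff_iff]
  simp only [List.any_eq_true, PySem.List.mem_pyRange_one, Bool.and_eq_true, beq_iff_eq]
  constructor
  · rintro ⟨x, ⟨h0, hn⟩, hq, rfl⟩
    exact hq
  · intro hq
    exact ⟨(i : Int), ⟨Int.natCast_nonneg i, hi⟩, hq, rfl⟩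


theorem colcheck (n : Int) (p : Int → Int → Bool) :
    (((PySem.List.pyRange 0 n 1).foldl (fun c y => (PySem.List.pyRange 0 n 1).foldl
        (fun c' x => if p y x then PySem.List.pySetD c' x 1 else c') c)
      ((PySem.List.pyRange 0 n 1).map (fun _ => (0 : Int)))).all (fun e => !(e == 0)))
    = (PySem.List.pyRange 0 n 1).all (fun x => (PySem.List.pyRange 0 n 1).any (fun y => p y x)) := by
  have hxs : ∀ x ∈ PySem.List.pyRange 0 n 1, 0 ≤ x := by
    intro x hx
    exact (PySem.List.mem_pyRange_one.mp hx).1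
  have hlen0 : ((PySem.List.pyRange 0 n 1).map (fun _ => (0 : Int))).length = (n - 0).toNat := by
    simp [PySem.List.length_pyRange_one]
  have hchar : ∀ i : Nat,
      ((PySem.List.pyRange 0 n 1).foldl (fun c y => (PySem.List.pyRange 0 n 1).foldl
          (fun c' x => if p y x then PySem.List.pySetD c' x 1 else c') c)
        ((PySem.List.pyRange 0 n 1).map (fun _ => (0 : Int))))[i]? =
      if i < n.toNat then
        (if ((PySem.List.pyRange 0 n 1).any fun y => p y (i : Int)) then some 1 else some 0)
      else none := by
    intro i
    rw [foldlRows_getElem? p _ _ hxs _ i]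
    by_cases hi : i < n.toNat
    · have hi' : (i : Int) < n := by omega
      have h0 : ((PySem.List.pyRange 0 n 1).map (fun _ => (0 : Int)))[i]? = some 0 := by
        rw [List.getElem?_map]
        rw [List.getElem?_eq_getElem (by simpa [PySem.List.length_pyRange_one] using hi)]
        simp
      simp only [fun y => any_range_eq n (p y) i hi', hlen0, h0]
      by_cases hany : ((PySem.List.pyRange 0 n 1).any fun y => p y (i : Int)) = true
      · simp [hany, hi]
      · simp only [Bool.not_eq_true] at hany
        simp [hany, hi]
    · have hnone : ((PySem.List.pyRange 0 n 1).map (fun _ => (0 : Int)))[i]? = none := by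
        apply List.getElem?_eq_none
        simp only [hlen0]
        omega
      rw [if_neg (by rw [hlen0]; omega), hnone, if_neg hi]
  rw [Bool.eq_iff_iff]
  constructor
  · intro hall
    rw [List.all_eq_true]
    intro x hx
    obtain ⟨hx0, hxn⟩ := PySem.List.mem_pyRange_one.mp hx
    have hxi : x = ((x.toNat : Nat) : Int) := by omega
    by_contra hany
    simp only [Bool.not_eq_true] at hany
    have h0mem : (0 : Int) ∈ ((PySem.List.pyRange 0 n 1).foldl (fun c y => (PySem.List.pyRange 0 n 1).foldl
          (fun c' x => if p y x then PySem.List.pySetD c' x 1 else c') c)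
        ((PySem.List.pyRange 0 n 1).map (fun _ => (0 : Int)))) := by
      apply List.mem_of_getElem? (i := x.toNat)
      rw [hchar x.toNat, if_pos (by omega), if_neg (by rw [← hxi]; simp [hany])]
    have := List.all_eq_true.mp hall 0 h0mem
    simp at this
  · intro hall
    rw [List.all_eq_true]
    intro e he
    obtain ⟨i, hFi⟩ := List.mem_iff_getElem?.mp he
    rw [hchar i] at hFi
    by_cases hi : i < n.toNat
    · rw [if_pos hi] at hFi
      have hmem : ((i : Nat) : Int) ∈ PySem.List.pyRange 0 n 1 := by
        rw [PySem.List.mem_pyRange_one]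
        constructor
        · exact Int.natCast_nonneg i
        · omega
      have hany := List.all_eq_true.mp hall _ hmem
      simp only at hany
      rw [if_pos hany] at hFi
      have : e = 1 := by injection hFi with h; omega
      simp [this]
    · rw [if_neg hi] at hFi
      exact absurd hFi (by simp)


theorem zero_check_eq_alt (tab : List (List Int)) : zero_check tab = zero_check_alt tab := by
  show (match zcRowsA tab (tab.length : Int) (PySem.List.pyRange 0 (tab.length : Int) 1) ((PySem.List.pyRange 0 (tab.length : Int) 1).map (fun _ => 0)) with
    | none => false
    | some col => col.all fun element => !(element == 0)) = _
  rw [zcRowsA_eq]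
  by_cases hrows : ((PySem.List.pyRange 0 (tab.length : Int) 1).all fun y =>
      (PySem.List.pyRange 0 (tab.length : Int) 1).any fun x =>
        PySem.List.pyGetD (PySem.List.pyGetD tab y []) x 0 == 0) = true
  · simp only [hrows, if_true]
    rw [show zero_check_alt tab = ((PySem.List.pyRange 0 (tab.length : Int) 1).all fun x =>
      (PySem.List.pyRange 0 (tab.length : Int) 1).any fun y =>
        PySem.List.pyGetD (PySem.List.pyGetD tab y []) x 0 == 0) from by simp [zero_check_alt, hrows]]
    exact colcheck (tab.length : Int) (fun y x => PySem.List.pyGetD (PySem.List.pyGetD tab y []) x 0 == 0)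
  · simp only [Bool.not_eq_true] at hrows
    simp only [hrows, Bool.false_eq_true, if_false]
    simp [zero_check_alt, hrows]

-- ===== VERDICT (by name: the statement is the Claim_ definition above) =====
theorem zero_check_spec : Claim_equal_zero_check := by
  intro tab _ _
  unfold Spec_zero_check
  exact zero_check_eq_alt tab
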